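-- pv_equiv track=rewrite | github.com/rumtang/Futurist | src/tools/customer_analysis_tool.py | _categorize_driver
-- ===== SOURCE A (Python) =====
-- def _categorize_driver(driver: str) -> str:
--     """Categorize driver type."""
--     driver_categories = {
--         "functional": ["convenience", "value", "efficiency"],
--         "emotional": ["experience", "personalization", "trust"],
--         "social": ["social_proof", "sustainability", "innovation"]
--     }
--
--     for category, drivers in driver_categories.items():
--         if driver in drivers:
--             return category
--
--     return "other"
-- ===== SOURCE B (Python) =====
-- # Parallel flat-array encoding: find the driver's position in one flat list of
-- # all drivers and map the position arithmetically (index // 3) to the category.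
-- _ALL_DRIVERS = [
--     "convenience", "value", "efficiency",
--     "experience", "personalization", "trust",
--     "social_proof", "sustainability", "innovation",
-- ]
-- _CATEGORY_NAMES = ["functional", "emotional", "social"]
--
--
-- def _categorize_driver(driver: str) -> str:
--     """Categorize driver type via position arithmetic on a flat driver list."""
--     try:
--         i = _ALL_DRIVERS.index(driver)
--     except ValueError:
--         return "other"
--     return _CATEGORY_NAMES[i // 3]
-- ===== Notes on version B (the rewrite author's own statement) =====
-- stated objective: alternative
-- what changed: Replaced the loop over a category-to-drivers dict with membership tests by position arithmetic: the driver's index in one flat list of all nine drivers is divided by the group size (3) to select the category name, with 'other' when the driver is absent.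
import Mathlib
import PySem

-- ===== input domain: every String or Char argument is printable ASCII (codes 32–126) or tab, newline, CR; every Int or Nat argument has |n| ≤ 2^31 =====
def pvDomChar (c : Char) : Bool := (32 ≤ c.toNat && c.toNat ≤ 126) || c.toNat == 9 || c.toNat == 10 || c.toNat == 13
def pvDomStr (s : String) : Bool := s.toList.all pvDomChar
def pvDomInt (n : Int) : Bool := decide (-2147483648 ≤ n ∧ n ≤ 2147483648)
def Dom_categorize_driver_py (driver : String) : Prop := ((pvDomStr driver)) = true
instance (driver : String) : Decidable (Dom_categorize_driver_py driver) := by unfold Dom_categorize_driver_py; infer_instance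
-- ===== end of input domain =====

-- B replaces A's loop over a category dict with membership tests by position arithmetic
-- (index of the driver in one flat list, divided by the group size 3) — an alternative decomposition.

-- ===== PORT A =====
-- A's dict of categories, as an insertion-ordered association list
def pvDriverCategories : List (String × List String) :=
  [("functional", ["convenience", "value", "efficiency"]),
   ("emotional", ["experience", "personalization", "trust"]),
   ("social", ["social_proof", "sustainability", "innovation"])]

-- the for-loop with early return: scan items, test membership, return first hit
def pvCatLoop (driver : String) : List (String × List String) → String
  | [] => "other"
  | (category, drivers) :: rest =>
      if driver ∈ drivers then category else pvCatLoop driver rest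

def categorize_driver_py (driver : String) : String :=
  pvCatLoop driver pvDriverCategories

-- ===== PORT B =====
-- B's flat list of all nine drivers (group order) and the parallel category names
def pvAllDrivers : List String :=
  ["convenience", "value", "efficiency",
   "experience", "personalization", "trust",
   "social_proof", "sustainability", "innovation"]

def pvCategoryNames : List String := ["functional", "emotional", "social"]

def categorize_driver_py_alt (driver : String) : String :=
  match PySem.List.index? pvAllDrivers driver with
  | none => "other"   -- list.index raised ValueError
  | some i => (PySem.List.pyGet? pvCategoryNames (PySem.Int.floordiv (i : Int) 3)).getD ""
    -- _CATEGORY_NAMES[i // 3]; the index is always in range, .getD "" only totalizes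

-- ===== PRECONDITION & SPEC =====
def Spec_categorize_driver_py (driver : String) (out : String) : Prop := out = categorize_driver_py_alt driver
instance (driver : String) (out : String) : Decidable (Spec_categorize_driver_py driver out) := by unfold Spec_categorize_driver_py; infer_instance

-- ===== CLAIM (what is proved, stated in full; the proofs are below) =====
def Claim_equal_categorize_driver_py : Prop := ∀ (driver : String), Dom_categorize_driver_py driver → Spec_categorize_driver_py driver (categorize_driver_py driver)

-- ===== LEMMAS AND PROOFS =====

-- ===== VERDICT (by name: the statement is the Claim_ definition above) =====
theorem categorize_driver_py_spec : Claim_equal_categorize_driver_py := by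
  intro driver _
  unfold Spec_categorize_driver_py
  by_cases h1 : "convenience" = driver
  · subst h1; decide
  by_cases h2 : "value" = driver
  · subst h2; decide
  by_cases h3 : "efficiency" = driver
  · subst h3; decide
  by_cases h4 : "experience" = driver
  · subst h4; decide
  by_cases h5 : "personalization" = driver
  · subst h5; decide
  by_cases h6 : "trust" = driver
  · subst h6; decide
  by_cases h7 : "social_proof" = driver
  · subst h7; decide
  by_cases h8 : "sustainability" = driver
  · subst h8; decide
  by_cases h9 : "innovation" = driver
  · subst h9; decide
  simp [categorize_driver_py, pvCatLoop, pvDriverCategories, categorize_driver_py_alt,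
    pvAllDrivers, PySem.List.index?, List.idxOf?, List.findIdx?, List.findIdx?.go, h1, h2, h3, h4, h5, h6, h7, h8, h9, Ne.symm h1, Ne.symm h2, Ne.symm h3, Ne.symm h4, Ne.symm h5, Ne.symm h6, Ne.symm h7, Ne.symm h8, Ne.symm h9]
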